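-- pv_equiv track=rewrite | github.com/Lizt1996/VariationalQuantumGeneralizedEigensolver | QCircuit.py | Paulistring2Index
-- ===== SOURCE A (Python) =====
-- class QuantumCircuitError(Exception):
--     pass
--
-- def Paulistring2Index(paulistring: str):
--     paulistring = paulistring[::-1]
--     index = 0
--     for i in range(len(paulistring)):
--         if paulistring[i] == 'X':
--             index += 1 * 4 ** i
--         elif paulistring[i] == 'Y':
--             index += 2 * 4 ** i
--         elif paulistring[i] == 'Z':
--             index += 3 * 4 ** i
--         elif paulistring[i] != 'I':
--             raise QuantumCircuitError("Error in Paulistring2Index! Incorrect Pauli string input.")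
--     return int(index)
-- ===== SOURCE B (Python) =====
-- class QuantumCircuitError(Exception):
--     pass
--
-- def Paulistring2Index(paulistring: str):
--     index = 0
--     for c in paulistring:
--         if c == 'I':
--             d = 0
--         elif c == 'X':
--             d = 1
--         elif c == 'Y':
--             d = 2
--         elif c == 'Z':
--             d = 3
--         else:
--             raise QuantumCircuitError("Error in Paulistring2Index! Incorrect Pauli string input.")
--         index = index * 4 + d
--     return int(index)
-- ===== Notes on version B (the rewrite author's own statement) =====
-- stated objective: idiomatic
-- what changed: Replaces reverse-the-string plus per-position 4**i powers with a left-to-right Horner accumulation index = index*4 + digit.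
import Mathlib
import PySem

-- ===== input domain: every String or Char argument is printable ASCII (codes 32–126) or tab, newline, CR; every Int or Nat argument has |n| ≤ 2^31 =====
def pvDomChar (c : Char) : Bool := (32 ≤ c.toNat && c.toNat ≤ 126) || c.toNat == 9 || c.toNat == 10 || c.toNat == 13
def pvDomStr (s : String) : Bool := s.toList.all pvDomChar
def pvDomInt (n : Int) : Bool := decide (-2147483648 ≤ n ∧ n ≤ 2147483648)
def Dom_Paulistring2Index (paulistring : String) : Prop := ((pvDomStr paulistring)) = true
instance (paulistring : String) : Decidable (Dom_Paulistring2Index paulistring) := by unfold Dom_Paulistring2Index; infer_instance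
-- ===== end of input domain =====

-- B replaces A's string reversal and per-position 4**i powers with a left-to-right
-- Horner accumulation (index = index*4 + digit); idiomatic, same result on valid Pauli strings.


-- ===== PORT A =====
-- A reverses the string, then for i in range(len) adds 1/2/3 * 4**i per branch.
-- The 'raise' branch (any char outside IXYZ) is excluded by Pre_; the port leaves
-- index unchanged there, exactly like the 'I' case.
def Paulistring2Index (paulistring : String) : Int :=
  let r : List Char := paulistring.toList.reverse
  (List.range r.length).foldl (fun index i =>
    let c := r.getD i ' '
    if c = 'X' then index + 1 * 4 ^ i
    else if c = 'Y' then index + 2 * 4 ^ i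
    else if c = 'Z' then index + 3 * 4 ^ i
    else index) 0

-- ===== PORT B =====
-- Horner's rule, left to right; the 'raise' branch (excluded by Pre_) is ported as digit 0.
def Paulistring2Index_alt (paulistring : String) : Int :=
  paulistring.toList.foldl (fun index c =>
    index * 4 + (if c = 'I' then 0
                 else if c = 'X' then 1
                 else if c = 'Y' then 2
                 else if c = 'Z' then 3
                 else 0)) 0

-- ===== PRECONDITION & SPEC =====
-- Pre_ excludes exactly the strings containing a character outside {I,X,Y,Z},
-- on which the Python A (and B) raise QuantumCircuitError.
def Pre_Paulistring2Index (paulistring : String) : Prop :=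
  paulistring.toList.all (fun c => c == 'I' || c == 'X' || c == 'Y' || c == 'Z') = true
instance (paulistring : String) : Decidable (Pre_Paulistring2Index paulistring) := by
  unfold Pre_Paulistring2Index; infer_instance
def pvWitness_Paulistring2Index : String := "IXYZ"

def Spec_Paulistring2Index (paulistring : String) (out : Int) : Prop := out = Paulistring2Index_alt paulistring
instance (paulistring : String) (out : Int) : Decidable (Spec_Paulistring2Index paulistring out) := by unfold Spec_Paulistring2Index; infer_instance

-- ===== CLAIM (what is proved, stated in full; the proofs are below) =====
def Claim_equal_Paulistring2Index : Prop := ∀ (paulistring : String), Dom_Paulistring2Index paulistring → Pre_Paulistring2Index paulistring → Spec_Paulistring2Index paulistring (Paulistring2Index paulistring)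

-- ===== LEMMAS AND PROOFS =====

-- digit value of a Pauli character
def pvDigit (c : Char) : Int :=
  if c = 'X' then 1 else if c = 'Y' then 2 else if c = 'Z' then 3 else 0

-- A's loop body as a sum over the index range
def pvAFold (r : List Char) : Int :=
  (List.range r.length).foldl (fun index i => index + pvDigit (r.getD i ' ') * 4 ^ i) 0

lemma foldl_add_sum (h : Nat → Int) (l : List Nat) (a : Int) :
    l.foldl (fun index i => index + h i) a = a + (l.map h).sum := by
  induction l generalizing a with
  | nil => simp
  | cons x xs ih => simp [List.foldl_cons, ih]; ring

lemma pvAFold_eq_sum (r : List Char) :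
    pvAFold r = ((List.range r.length).map (fun i => pvDigit (r.getD i ' ') * 4 ^ i)).sum := by
  simpa using foldl_add_sum (fun i => pvDigit (r.getD i ' ') * 4 ^ i) (List.range r.length) 0

lemma pvAFold_cons (c : Char) (r : List Char) :
    pvAFold (c :: r) = pvDigit c + 4 * pvAFold r := by
  rw [pvAFold_eq_sum, pvAFold_eq_sum]
  show ((List.range (r.length + 1)).map _).sum = _
  rw [List.range_succ_eq_map, List.map_cons, List.map_map, List.sum_cons]
  have : ((List.range r.length).map
      ((fun i => pvDigit ((c :: r).getD i ' ') * 4 ^ i) ∘ Nat.succ)).sum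
      = 4 * ((List.range r.length).map (fun i => pvDigit (r.getD i ' ') * 4 ^ i)).sum := by
    rw [← List.sum_map_mul_left]
    congr 1; apply List.map_congr_left; intro i _
    simp [Function.comp, pow_succ]; ring
  simp only [List.getD_eq_getElem?_getD] at this
  simp [this]

-- B's Horner fold, generalized over the accumulator, equals the positional sum of the reverse
lemma horner_eq (l : List Char) (a : Int) :
    l.foldl (fun index c => index * 4 + pvDigit c) a
      = a * 4 ^ l.length + pvAFold l.reverse := by
  induction l generalizing a with
  | nil => simp [pvAFold]
  | cons c t ih =>
      rw [List.foldl_cons, ih]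
      have : pvAFold (t.reverse ++ [c]) = pvAFold t.reverse + pvDigit c * 4 ^ t.reverse.length := by
        induction t.reverse with
        | nil => simp [pvAFold]
        | cons x xs ih2 =>
            rw [List.cons_append, pvAFold_cons, pvAFold_cons, ih2]
            simp [List.length_cons, pow_succ]; ring
      simp only [List.reverse_cons, this, List.length_reverse, List.length_cons, pow_succ]
      ring

-- A's branch chain is pvDigit
lemma branch_eq_digit (index : Int) (c : Char) (i : Nat) :
    (if c = 'X' then index + 1 * 4 ^ i
     else if c = 'Y' then index + 2 * 4 ^ i
     else if c = 'Z' then index + 3 * 4 ^ i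
     else index) = index + pvDigit c * (4 : Int) ^ i := by
  unfold pvDigit; split_ifs <;> ring

-- B's digit chain is pvDigit
lemma bdigit_eq_digit (c : Char) :
    (if c = 'I' then (0 : Int) else if c = 'X' then 1 else if c = 'Y' then 2
     else if c = 'Z' then 3 else 0) = pvDigit c := by
  unfold pvDigit
  by_cases hI : c = 'I' <;> simp [hI]

lemma portA_eq_fold (s : String) : Paulistring2Index s = pvAFold s.toList.reverse := by
  unfold Paulistring2Index pvAFold
  apply List.foldl_ext
  intro index i _; exact branch_eq_digit index _ i

-- ===== VERDICT (by name: the statement is the Claim_ definition above) =====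
theorem Paulistring2Index_spec : Claim_equal_Paulistring2Index := by
  intro s _ _
  show Paulistring2Index s = Paulistring2Index_alt s
  rw [portA_eq_fold]
  unfold Paulistring2Index_alt
  have : s.toList.foldl (fun index c => index * 4 +
      (if c = 'I' then (0:Int) else if c = 'X' then 1 else if c = 'Y' then 2
       else if c = 'Z' then 3 else 0)) 0
      = s.toList.foldl (fun index c => index * 4 + pvDigit c) 0 := by
    apply List.foldl_ext
    intro index c _; rw [bdigit_eq_digit]
  rw [this, horner_eq]; simp
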